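-- pv_equiv track=rewrite | github.com/mdflamingo/test | task1/task1.py | get_a_path
-- ===== SOURCE A (Python) =====
-- def get_a_path(step: int, array: list[int]) -> str:
--     """A function that outputs a path along which,
--     moving with an interval of length m through a given array,
--     the end will be the first element."""
--     path = []
--     i = 0
--     while True:
--         path.append(array[i])
--         i = (i + step - 1) % len(array)
--         if i == 0:
--             break
--     result = ''.join(map(str, path))
--
--     return result
-- ===== SOURCE B (Python) =====
-- def get_a_path(step: int, array: list[int]) -> str:
--     """Closed-form version: the visited indices are 0, d, 2d, ... (mod n) with
--     d = (step-1) % n; the walk returns to 0 after exactly L = n // gcd(n, d)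
--     steps, so the result is built with a precomputed count instead of a loop
--     with a stop condition."""
--     n = len(array)
--     d = (step - 1) % n
--     a, b = n, d
--     while b:
--         a, b = b, a % b
--     length = n // a
--     return ''.join(str(array[k * d % n]) for k in range(length))
-- ===== Notes on version B (the rewrite author's own statement) =====
-- stated objective: alternative
-- what changed: Replaces the stop-condition while-loop over the index walk by a closed-form iteration count L = n // gcd(n, (step-1) % n) (gcd via an inline Euclid loop) and builds the string by joining over range(L) with index k*d % n.
import Mathlib
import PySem

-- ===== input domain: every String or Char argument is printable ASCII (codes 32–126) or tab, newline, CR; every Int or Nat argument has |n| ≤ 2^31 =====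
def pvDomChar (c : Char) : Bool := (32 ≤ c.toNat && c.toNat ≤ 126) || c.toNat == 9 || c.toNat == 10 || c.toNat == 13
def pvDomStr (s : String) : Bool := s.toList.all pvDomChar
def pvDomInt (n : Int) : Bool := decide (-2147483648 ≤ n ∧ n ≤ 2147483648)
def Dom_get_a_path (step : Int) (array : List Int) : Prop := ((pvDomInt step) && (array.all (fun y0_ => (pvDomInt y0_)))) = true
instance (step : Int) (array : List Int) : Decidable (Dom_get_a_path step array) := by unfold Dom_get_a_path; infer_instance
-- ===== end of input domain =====

-- B replaces A's stop-condition while-loop by a closed-form iteration count n // gcd(n, (step-1) % n); objective: alternative (same cost).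

-- ===== PORT A =====
-- A's `while True` loop; it always returns to index 0 within `array.length` body
-- iterations (proved below), so fuel `array.length` makes the port exact on nonempty arrays.
-- array[i] is ported as pyGetD: under Pre_ (array ≠ []) the index (… % len) is always in range.
def get_a_path_loop (step : Int) (array : List Int) : Nat → Int → List Int → List Int
  | 0, _, path => path
  | fuel + 1, i, path =>
    let path' := path ++ [PySem.List.pyGetD array i 0]
    let i' := PySem.Int.mod (i + step - 1) (PySem.List.len array)
    if i' = 0 then path' else get_a_path_loop step array fuel i' path'

def get_a_path (step : Int) (array : List Int) : String :=
  PySem.Str.join "" ((get_a_path_loop step array array.length 0 []).map PySem.Int.toStr)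

-- ===== PORT B =====
-- Source B's inline Euclid loop `while b: a, b = b, a % b`
def get_a_path_euclid (a b : Int) : Int :=
  if _h : b = 0 then a else get_a_path_euclid b (PySem.Int.mod a b)
termination_by b.natAbs
decreasing_by
  rcases lt_or_gt_of_ne _h with hb | hb
  · have hm := PySem.Int.mod_neg_bounds a hb
    omega
  · have h1 := PySem.Int.mod_nonneg a hb
    have h2 := PySem.Int.mod_lt a hb
    omega

def get_a_path_alt (step : Int) (array : List Int) : String :=
  let n : Int := PySem.List.len array
  let d : Int := PySem.Int.mod (step - 1) n
  let g : Int := get_a_path_euclid n d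
  let L : Int := PySem.Int.floordiv n g
  PySem.Str.join "" ((PySem.List.pyRange 0 L 1).map
    (fun k => PySem.Int.toStr (PySem.List.pyGetD array (PySem.Int.mod (k * d) n) 0)))

-- ===== PRECONDITION & SPEC =====
-- Pre_ excludes exactly the empty array, where Python A raises IndexError (array[0]).
def Pre_get_a_path (step : Int) (array : List Int) : Prop := array ≠ []
instance (step : Int) (array : List Int) : Decidable (Pre_get_a_path step array) := by unfold Pre_get_a_path; infer_instance
def pvWitness_get_a_path : Int × List Int := (3, [1, 2, 3, 4])

def Spec_get_a_path (step : Int) (array : List Int) (out : String) : Prop := out = get_a_path_alt step array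
instance (step : Int) (array : List Int) (out : String) : Decidable (Spec_get_a_path step array out) := by unfold Spec_get_a_path; infer_instance

-- ===== CLAIM (what is proved, stated in full; the proofs are below) =====
def Claim_equal_get_a_path : Prop := ∀ (step : Int) (array : List Int), Dom_get_a_path step array → Pre_get_a_path step array → Spec_get_a_path step array (get_a_path step array)

-- ===== LEMMAS AND PROOFS =====

theorem pv_euclid_eq_gcd (b a : Nat) : get_a_path_euclid (a : Int) (b : Int) = (Nat.gcd b a : Int) := by
  induction b using Nat.strong_induction_on generalizing a with
  | _ b ih =>
    rw [get_a_path_euclid]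
    by_cases hb : b = 0
    · subst hb; simp
    · have hb' : (b : Int) ≠ 0 := by exact_mod_cast hb
      rw [dif_neg hb']
      rw [PySem.Int.mod_natCast a b, ih (a % b) (Nat.mod_lt a (Nat.pos_of_ne_zero hb)) b]
      exact congrArg _ (Nat.gcd_rec b a).symm

-- `(k*dn) % n = 0` exactly when the walk length `n / gcd dn n` divides k
theorem pv_key (n dn k : Nat) (hn : 0 < n) :
    (k * dn) % n = 0 ↔ (n / Nat.gcd dn n) ∣ k := by
  have hg : 0 < Nat.gcd dn n := Nat.gcd_pos_of_pos_right _ hn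
  obtain ⟨g, N, D, hgpos, hN, hD, hcop, hNdiv⟩ :
      ∃ g N D, 0 < g ∧ n = g * N ∧ dn = g * D ∧ Nat.Coprime D N ∧ n / Nat.gcd dn n = N := by
    refine ⟨Nat.gcd dn n, n / Nat.gcd dn n, dn / Nat.gcd dn n, hg,
      (Nat.mul_div_cancel' (Nat.gcd_dvd_right dn n)).symm,
      (Nat.mul_div_cancel' (Nat.gcd_dvd_left dn n)).symm,
      Nat.coprime_div_gcd_div_gcd hg, rfl⟩
  rw [← Nat.dvd_iff_mod_eq_zero, hNdiv]
  constructor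
  · intro h
    rw [hN] at h; rw [hD] at h
    have h2 : g * N ∣ g * (k * D) := by rw [show g * (k * D) = k * (g * D) by ring]; exact h
    exact hcop.symm.dvd_of_dvd_mul_right ((mul_dvd_mul_iff_left (ne_of_gt hgpos)).mp h2)
  · rintro ⟨t, rfl⟩
    rw [hN, hD]; exact ⟨t * D, by ring⟩

-- one body iteration of A's loop advances the index by dn = (step-1) % n
theorem pv_step (step : Int) (n x : Nat) (hn : 0 < n) :
    PySem.Int.mod ((x % n : Nat) + step - 1) (n : Int)
      = ((x + (PySem.Int.mod (step - 1) (n : Int)).toNat) % n : Nat) := by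
  have hnpos : (0 : Int) < (n : Int) := by exact_mod_cast hn
  have hmodeq : ∀ a : Int, PySem.Int.mod a (n : Int) = a % (n : Int) :=
    fun _ => PySem.Int.mod_eq_emod_of_pos hnpos
  rw [hmodeq, hmodeq]
  have hd : (((step - 1) % (n : Int)).toNat : Int) = (step - 1) % (n : Int) :=
    Int.toNat_of_nonneg (Int.emod_nonneg _ (by omega))
  push_cast [hd]
  conv_lhs => rw [show ((x : Int) % n + step - 1) = ((x : Int) % n + (step - 1)) by ring]
  rw [Int.emod_add_emod, Int.add_emod_emod]

-- invariant of A's loop: entered at index (k*dn) % n with 1 ≤ k it appends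
-- exactly the elements at indices (j*dn) % n for j = k, …, L-1
theorem pv_loop (step : Int) (array : List Int) (n dn L : Nat)
    (hlen : array.length = n) (hn : 0 < n)
    (hdn : dn = (PySem.Int.mod (step - 1) (n : Int)).toNat)
    (hL : L = n / Nat.gcd dn n) (m : Nat) :
    ∀ (k fuel : Nat) (acc : List Int),
    k + (m + 1) = L → 1 ≤ k → m + 1 ≤ fuel →
    get_a_path_loop step array fuel ((k * dn % n : Nat) : Int) acc
      = acc ++ (List.range' k (m + 1)).map (fun j =>
          PySem.List.pyGetD array ((j * dn % n : Nat) : Int) 0) := by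
  induction m with
  | zero =>
    intro k fuel acc hkL hk hfuel
    obtain ⟨f, rfl⟩ : ∃ f, fuel = f + 1 := ⟨fuel - 1, by omega⟩
    simp only [get_a_path_loop, PySem.List.len_eq, hlen]
    rw [pv_step step n _ hn, ← hdn]
    have hz : ((k * dn + dn) % n) = 0 := by
      rw [show k * dn + dn = (k + 1) * dn by ring]
      exact (pv_key n dn _ hn).mpr (by rw [← hL, ← hkL])
    rw [hz]
    simp
  | succ m ih =>
    intro k fuel acc hkL hk hfuel
    obtain ⟨f, rfl⟩ : ∃ f, fuel = f + 1 := ⟨fuel - 1, by omega⟩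
    simp only [get_a_path_loop, PySem.List.len_eq, hlen]
    rw [pv_step step n _ hn, ← hdn]
    rw [show k * dn + dn = (k + 1) * dn by ring]
    have hnz : ((k + 1) * dn % n) ≠ 0 := by
      intro h
      have h2 := (pv_key n dn _ hn).mp h
      rw [← hL] at h2
      exact absurd (Nat.le_of_dvd (by omega) h2) (by omega)
    rw [if_neg (by exact_mod_cast hnz)]
    rw [ih (k + 1) f (acc ++ [_]) (by omega) (by omega) (by omega)]
    simp [List.range'_succ]

-- ===== VERDICT (by name: the statement is the Claim_ definition above) =====
theorem get_a_path_spec : Claim_equal_get_a_path := by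
  intro step array _ hne
  unfold Pre_get_a_path at hne
  unfold Spec_get_a_path get_a_path get_a_path_alt
  dsimp only
  have hn : 0 < array.length := List.length_pos_of_ne_nil hne
  set n := array.length with hnn
  have hnpos : (0 : Int) < (n : Int) := by exact_mod_cast hn
  set dn := (PySem.Int.mod (step - 1) (n : Int)).toNat with hdn
  set L := n / Nat.gcd dn n with hL
  have hd : PySem.Int.mod (step - 1) (n : Int) = (dn : Int) :=
    (Int.toNat_of_nonneg (PySem.Int.mod_nonneg _ hnpos)).symm
  have hdnlt : dn < n := by
    have := PySem.Int.mod_lt (step - 1) hnpos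
    omega
  -- simplify B's list to (List.range L).map (elt ∘ cast)
  have hB : (PySem.List.pyRange 0 (PySem.Int.floordiv (PySem.List.len array)
        (get_a_path_euclid (PySem.List.len array) (PySem.Int.mod (step - 1) (PySem.List.len array)))) 1).map
      (fun k => PySem.Int.toStr (PySem.List.pyGetD array
        (PySem.Int.mod (k * PySem.Int.mod (step - 1) (PySem.List.len array)) (PySem.List.len array)) 0))
      = (List.range L).map (fun j => PySem.Int.toStr
          (PySem.List.pyGetD array ((j * dn % n : Nat) : Int) 0)) := by
    rw [PySem.List.len_eq, hd, pv_euclid_eq_gcd, PySem.Int.floordiv_natCast, ← hL,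
      PySem.List.pyRange_zero, Int.toNat_natCast, List.map_map]
    refine List.map_congr_left (fun j _ => ?_)
    simp only [Function.comp]
    rw [show ((j : Int) * (dn : Int)) = ((j * dn : Nat) : Int) by push_cast; ring,
      PySem.Int.mod_natCast]
  rw [hB]
  -- unfold the first body iteration of A's loop
  obtain ⟨f, hf⟩ : ∃ f, n = f + 1 := ⟨n - 1, by omega⟩
  rw [show get_a_path_loop step array n 0 [] = get_a_path_loop step array (f + 1) 0 [] by rw [← hf]]
  simp only [get_a_path_loop, PySem.List.len_eq]
  rw [show ((0 : Int) + step - 1) = step - 1 by ring, ← hnn, hd]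
  by_cases hdz : dn = 0
  · -- stride 0: one element; L = 1
    have hL1 : L = 1 := by rw [hL, hdz, Nat.gcd_zero_left, Nat.div_self hn]
    rw [if_pos (by exact_mod_cast hdz), hL1]
    simp
  · -- stride ≠ 0: L ≥ 2, use the loop invariant from k = 1
    have hgpos : 0 < Nat.gcd dn n := Nat.gcd_pos_of_pos_right _ hn
    have hLpos : 0 < L := Nat.div_pos (Nat.le_of_dvd hn (Nat.gcd_dvd_right dn n)) hgpos
    have hLn : L ≤ n := Nat.div_le_self _ _
    have hL2 : 2 ≤ L := by
      rcases Nat.lt_or_ge L 2 with h | h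
      · exfalso
        have hL1 : L = 1 := by omega
        have : (1 * dn) % n = 0 := (pv_key n dn 1 hn).mpr (by rw [← hL, hL1])
        rw [one_mul, Nat.mod_eq_of_lt hdnlt] at this
        exact hdz this
      · exact h
    rw [if_neg (by exact_mod_cast hdz)]
    rw [show ((dn : Nat) : Int) = ((1 * dn % n : Nat) : Int) by
      rw [one_mul, Nat.mod_eq_of_lt hdnlt]]
    rw [pv_loop step array n dn L hnn.symm hn hdn hL (L - 2) 1 f _
      (by omega) le_rfl (by omega)]
    congr 1
    rw [show L - 2 + 1 = L - 1 by omega, List.range_eq_range']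
    conv_rhs => rw [show L = (L - 1) + 1 by omega, List.range'_succ]
    simp
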